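-- pv_equiv track=rewrite | github.com/idelaniyariets/templates-for-inf_ege | solutions/n_9/23440.py | chpovt
-- ===== SOURCE A (Python) =====
-- def chpovt(ln):
--     c = 0
--     t = 0
--     for el in ln:
--         if ln.count(el) == 1:
--             c += 1
--         if ln.count(el) == 3:
--             t += 1
--     if c == 1 and t == 6:
--         return True
--     else:
--         return False
--
-- c = 0
-- ===== SOURCE B (Python) =====
-- def chpovt(ln):
--     s = sorted(ln)
--     ones = 0
--     threes = 0
--     i = 0
--     n = len(s)
--     while i < n:
--         j = i
--         while j < n and s[j] == s[i]:
--             j += 1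
--         run = j - i
--         if run == 1:
--             ones += 1
--         if run == 3:
--             threes += 1
--         i = j
--     return ones == 1 and threes == 2
-- ===== Notes on version B (the rewrite author's own statement) =====
-- stated objective: faster
-- what changed: Replaced the per-element ln.count scans (quadratic) by sorting a copy and one run-length pass, returning ones == 1 and threes == 2 (a length-3 run contributes 3 to A's t, so t == 6 iff threes == 2).
import Mathlib
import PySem

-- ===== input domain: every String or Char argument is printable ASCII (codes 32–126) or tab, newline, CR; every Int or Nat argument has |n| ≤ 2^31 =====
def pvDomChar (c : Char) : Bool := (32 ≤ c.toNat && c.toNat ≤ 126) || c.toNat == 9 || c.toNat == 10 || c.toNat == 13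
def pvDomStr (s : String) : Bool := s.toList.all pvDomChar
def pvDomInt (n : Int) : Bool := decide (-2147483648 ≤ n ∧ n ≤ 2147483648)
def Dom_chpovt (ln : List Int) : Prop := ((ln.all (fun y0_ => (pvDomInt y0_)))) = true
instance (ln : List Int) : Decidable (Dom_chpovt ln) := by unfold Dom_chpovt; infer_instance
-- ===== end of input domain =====

-- B sorts a copy of the list and counts run lengths in one pass instead of A's per-element ln.count scans.

-- ===== PORT A =====
def chpovt (ln : List Int) : Bool :=
  let ct := ln.foldl (fun (ct : Int × Int) el =>
      (if ln.count el = 1 then ct.1 + 1 else ct.1,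
       if ln.count el = 3 then ct.2 + 1 else ct.2)) (0, 0)
  if ct.1 = 1 ∧ ct.2 = 6 then true else false

-- ===== PORT B =====
-- the outer while loop of Source B: each step consumes one maximal run of equal elements
def runScan : List Int → Int → Int → Int × Int
  | [], ones, threes => (ones, threes)
  | x :: xs, ones, threes =>
    let run : Int := ((xs.takeWhile (fun y => y == x)).length : Int) + 1
    runScan (xs.dropWhile (fun y => y == x))
      (if run = 1 then ones + 1 else ones)
      (if run = 3 then threes + 1 else threes)
termination_by l _ _ => l.length
decreasing_by
  simp only [List.length_cons]
  exact Nat.lt_succ_of_le (List.length_dropWhile_le _ _)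

def chpovt_alt (ln : List Int) : Bool :=
  let s := PySem.List.sorted ln (fun x => x) false
  let p := runScan s 0 0
  decide (p.1 = 1 ∧ p.2 = 2)

-- ===== PRECONDITION & SPEC =====
def Spec_chpovt (ln : List Int) (out : Bool) : Prop := out = chpovt_alt ln
instance (ln : List Int) (out : Bool) : Decidable (Spec_chpovt ln out) := by unfold Spec_chpovt; infer_instance

-- ===== CLAIM (what is proved, stated in full; the proofs are below) =====
def Claim_equal_chpovt : Prop := ∀ (ln : List Int), Dom_chpovt ln → Spec_chpovt ln (chpovt ln)

-- ===== LEMMAS AND PROOFS =====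

-- A's fold accumulates the two countP's of the full list
theorem foldA (ln l : List Int) (c t : Int) :
    l.foldl (fun (ct : Int × Int) el =>
      (if ln.count el = 1 then ct.1 + 1 else ct.1,
       if ln.count el = 3 then ct.2 + 1 else ct.2)) (c, t)
    = (c + (l.countP (fun el => ln.count el == 1) : Int),
       t + (l.countP (fun el => ln.count el == 3) : Int)) := by
  induction l generalizing c t with
  | nil => simp
  | cons x xs ih =>
    simp only [List.foldl_cons, List.countP_cons, ih]
    by_cases h1 : ln.count x = 1 <;> by_cases h3 : ln.count x = 3 <;>
      simp [h1, h3] <;> omega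


theorem countP_all_eq (p : Int → Bool) (x : Int) (l : List Int)
    (hl : ∀ y ∈ l, y = x) :
    l.countP p = if p x then l.length else 0 := by
  induction l with
  | nil => simp
  | cons y ys ih =>
    have hy : y = x := hl y (by simp)
    rw [List.countP_cons, ih (fun z hz => hl z (by simp [hz])), hy]
    by_cases h : p x <;> simp [h]

-- run decomposition invariant on a sorted list
theorem runScan_spec : ∀ (n : Nat) (s : List Int), s.length ≤ n → s.Pairwise (· ≤ ·) → ∀ (o th : Int),
    (runScan s o th).1 = o + (s.countP (fun el => s.count el == 1) : Int) ∧
    3 * (runScan s o th).2 = 3 * th + (s.countP (fun el => s.count el == 3) : Int) := by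
  intro n
  induction n with
  | zero =>
    intro s hlen _ o th
    have : s = [] := List.length_eq_zero_iff.mp (Nat.le_zero.mp hlen)
    subst this; simp [runScan]
  | succ n ihn =>
    intro s hlen hs o th
    match s with
    | [] => simp [runScan]
    | x :: xs =>
    have ih : ∀ (b : List Int), b.length ≤ n → b.Pairwise (· ≤ ·) → ∀ (o th : Int),
        (runScan b o th).1 = o + (b.countP (fun el => b.count el == 1) : Int) ∧
        3 * (runScan b o th).2 = 3 * th + (b.countP (fun el => b.count el == 3) : Int) :=
      fun b hb => ihn b hb
    set a := xs.takeWhile (fun y => y == x) with hadef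
    set b := xs.dropWhile (fun y => y == x) with hbdef
    have hxs : a ++ b = xs := List.takeWhile_append_dropWhile
    have ha : ∀ y ∈ a, y = x := by
      intro y hy
      have := List.mem_takeWhile_imp hy
      simpa using this
    have hxle : ∀ y ∈ xs, x ≤ y := by
      intro y hy; exact (List.pairwise_cons.mp hs).1 y hy
    have hbpw : b.Pairwise (· ≤ ·) := ((List.pairwise_cons.mp hs).2).sublist (List.dropWhile_sublist _)
    have hxb : ∀ el ∈ b, x < el := by
      intro el hel
      cases hb : b with
      | nil => simp [hb] at hel
      | cons y0 ys =>
        have hbne : xs.dropWhile (fun y => y == x) ≠ [] := by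
          rw [← hbdef, hb]; simp
        have hhead := List.head_dropWhile_not (fun y => y == x) hbne
        have hy0ne : (y0 == x) = false := by
          have heq : (xs.dropWhile (fun y => y == x)).head hbne = y0 := by
            simp [← hbdef, hb]
          rwa [heq] at hhead
        have hy0x : x < y0 := by
          have : x ≤ y0 := hxle y0 (by rw [← hxs, hb]; simp)
          have hne : y0 ≠ x := by simpa using hy0ne
          omega
        rw [hb] at hel
        rcases List.mem_cons.mp hel with rfl | hel'
        · exact hy0x
        · have : y0 ≤ el := (List.pairwise_cons.mp (hb ▸ hbpw)).1 el hel'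
          omega
    have hxnotb : x ∉ b := fun h => absurd (hxb x h) (lt_irrefl x)
    have hsplit : (x :: xs) = (x :: a) ++ b := by simp [← hxs]
    -- counts of elements of b in the full list reduce to counts in b
    have hcountb : ∀ el ∈ b, (x :: xs).count el = b.count el := by
      intro el hel
      have helx : el ≠ x := fun h => absurd (hxb el hel) (by simp [h])
      have hcnta : (x :: a).count el = 0 := by
        rw [List.count_eq_zero]
        intro hmem
        rcases List.mem_cons.mp hmem with rfl | hmem'
        · exact helx rfl
        · exact helx (ha el hmem')
      rw [hsplit, List.count_append, hcnta, Nat.zero_add]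
    have hcountx : (x :: xs).count x = a.length + 1 := by
      rw [hsplit, List.count_append]
      have h1 : (x :: a).count x = a.length + 1 := by
        have hall : (x :: a).count x = (x :: a).length := List.count_eq_length.mpr (by
          intro bb hbb
          rcases List.mem_cons.mp hbb with rfl | h'
          · rfl
          · exact (ha bb h').symm)
        simpa using hall
      have h2 : b.count x = 0 := List.count_eq_zero.mpr hxnotb
      omega
    -- split the countP's
    have hsplitP : ∀ (k : Nat),
        (x :: xs).countP (fun el => (x :: xs).count el == k)
        = (if ((x :: xs).count x == k) then a.length + 1 else 0)
          + b.countP (fun el => b.count el == k) := by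
      intro k
      rw [hsplit, List.countP_append, ← hsplit]
      congr 1
      · have hall : ∀ y ∈ (x :: a), y = x := by
          intro y hy
          rcases List.mem_cons.mp hy with rfl | h'
          · rfl
          · exact ha y h'
        rw [countP_all_eq _ x _ hall]
        simp
      · exact List.countP_congr (fun el hel => by simp [hcountb el hel])
    have hblen : b.length ≤ n := by
      have h1 : b.length ≤ xs.length := List.length_dropWhile_le _ _
      have h2 : xs.length ≤ n := by simpa using Nat.succ_le_succ_iff.mp hlen
      omega
    have hb1 := ih b hblen hbpw (if ((a.length : Int) + 1) = 1 then o + 1 else o)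
                       (if ((a.length : Int) + 1) = 3 then th + 1 else th)
    constructor
    · rw [runScan]
      simp only [← hadef, ← hbdef]
      rw [hb1.1, hsplitP 1, hcountx]
      by_cases h : a.length = 0 <;> simp [h] <;> omega
    · rw [runScan]
      simp only [← hadef, ← hbdef]
      rw [hb1.2, hsplitP 3, hcountx]
      by_cases h : a.length = 2
      · simp [h]; omega
      · have hne : ¬ ((a.length : Int) + 1) = 3 := by omega
        have hne' : ¬ (a.length + 1 == 3) = true := by simp; omega
        simp [hne, hne']

-- ===== VERDICT (by name: the statement is the Claim_ definition above) =====
theorem chpovt_spec : Claim_equal_chpovt := by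
  intro ln _
  unfold Spec_chpovt chpovt chpovt_alt
  set s := PySem.List.sorted ln (fun x => x) false with hsdef
  have hperm : s.Perm ln := PySem.List.sorted_perm ln _ _
  have hpw : s.Pairwise (· ≤ ·) := by
    have := PySem.List.sorted_pairwise (xs := ln) (key := fun x => x)
    simpa using this
  have hrs := runScan_spec s.length s (le_refl _) hpw 0 0
  have hc1 : ln.countP (fun el => ln.count el == 1) = s.countP (fun el => s.count el == 1) := by
    rw [← hperm.countP_eq]
    exact List.countP_congr (fun el _ => by rw [hperm.count_eq])
  have hc3 : ln.countP (fun el => ln.count el == 3) = s.countP (fun el => s.count el == 3) := by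
    rw [← hperm.countP_eq]
    exact List.countP_congr (fun el _ => by rw [hperm.count_eq])
  rw [foldA]
  simp only [Int.zero_add] at *
  rcases hrs with ⟨h1, h3⟩
  have : ((ln.countP (fun el => ln.count el == 1) : Int) = 1 ∧
          (ln.countP (fun el => ln.count el == 3) : Int) = 6)
       ↔ ((runScan s 0 0).1 = 1 ∧ (runScan s 0 0).2 = 2) := by
    rw [hc1, hc3]; omega
  split <;> rename_i h
  · exact (decide_eq_true (this.mp h)).symm
  · exact (decide_eq_false (fun hc => h (this.mpr hc))).symm
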